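-- pv_equiv track=rewrite | github.com/stocke12/NationalParkPlanner | app.py | guess_day_for_activity
-- ===== SOURCE A (Python) =====
-- def guess_day_for_activity(activity_name, day_map, default_day=1):
--     name_lower = activity_name.lower()
--     for line_text, day_num in day_map.items():
--         if name_lower in line_text or line_text in name_lower:
--             return day_num
--     name_words = set(name_lower.split())
--     best_overlap = 0
--     best_day = default_day
--     for line_text, day_num in day_map.items():
--         line_words = set(line_text.split())
--         overlap = len(name_words & line_words)
--         if overlap > best_overlap and overlap >= 2:
--             best_overlap = overlap
--             best_day = day_num
--     return best_day
-- ===== SOURCE B (Python) =====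
-- def guess_day_for_activity(activity_name, day_map, default_day=1):
--     # single pass: a substring hit returns immediately and outranks any
--     # word-overlap candidate, so the overlap bookkeeping is fused into the loop
--     name_lower = activity_name.lower()
--     name_words = set(name_lower.split())
--     best_overlap = 0
--     best_day = default_day
--     for line_text, day_num in day_map.items():
--         if name_lower in line_text or line_text in name_lower:
--             return day_num
--         overlap = len(name_words & set(line_text.split()))
--         if overlap > best_overlap and overlap >= 2:
--             best_overlap = overlap
--             best_day = day_num
--     return best_day
-- ===== Notes on version B (the rewrite author's own statement) =====
-- stated objective: simpler
-- what changed: B fuses A's two sequential passes over day_map into one loop that returns on the first substring hit and otherwise maintains the best word-overlap candidate, valid because a substring match anywhere outranks every overlap candidate.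
import Mathlib
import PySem

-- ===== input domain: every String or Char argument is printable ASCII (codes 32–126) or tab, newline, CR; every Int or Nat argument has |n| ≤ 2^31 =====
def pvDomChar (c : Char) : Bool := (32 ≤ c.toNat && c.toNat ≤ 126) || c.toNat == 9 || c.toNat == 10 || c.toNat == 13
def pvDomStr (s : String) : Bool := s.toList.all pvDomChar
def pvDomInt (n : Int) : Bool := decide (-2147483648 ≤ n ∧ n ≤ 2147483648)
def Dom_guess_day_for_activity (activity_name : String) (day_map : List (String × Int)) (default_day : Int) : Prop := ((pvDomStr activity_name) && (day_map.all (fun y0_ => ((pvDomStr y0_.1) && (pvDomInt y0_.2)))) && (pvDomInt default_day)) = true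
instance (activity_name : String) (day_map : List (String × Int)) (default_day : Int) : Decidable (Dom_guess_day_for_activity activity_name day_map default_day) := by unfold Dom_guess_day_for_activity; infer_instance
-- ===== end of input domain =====

-- B fuses A's two sequential passes over day_map into one loop (substring hit returns
-- immediately and outranks any overlap candidate). Objective: simpler, one pass.

-- ===== PORT A =====
-- first loop of A: return day_num on the first substring match
def pvA_sub (name_lower : String) : List (String × Int) → Option Int
  | [] => none
  | (t, d) :: rest =>
    if PySem.Str.isIn name_lower t || PySem.Str.isIn t name_lower then some d
    else pvA_sub name_lower rest

-- body of A's second loop (state = (best_overlap, best_day))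
def pvA_step (nw : PySem.Set String) (acc : Int × Int) (p : String × Int) : Int × Int :=
  let lw := PySem.Set.ofList (PySem.Str.split₀ p.1)
  let overlap : Int := PySem.Set.len (PySem.Set.inter nw lw)
  if overlap > acc.1 && overlap ≥ 2 then (overlap, p.2) else acc

def guess_day_for_activity (activity_name : String) (day_map : List (String × Int)) (default_day : Int) : Int :=
  let name_lower := PySem.Str.lower activity_name
  match pvA_sub name_lower day_map with
  | some d => d
  | none =>
    let name_words := PySem.Set.ofList (PySem.Str.split₀ name_lower)
    (day_map.foldl (pvA_step name_words) (0, default_day)).2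

-- ===== PORT B =====
-- B's single fused loop: substring hit returns d; otherwise update (best_overlap, best_day)
def pvB_loop (nl : String) (nw : PySem.Set String) : List (String × Int) → Int × Int → Int
  | [], acc => acc.2
  | (t, d) :: rest, acc =>
    if PySem.Str.isIn nl t || PySem.Str.isIn t nl then d
    else
      let overlap : Int := PySem.Set.len (PySem.Set.inter nw (PySem.Set.ofList (PySem.Str.split₀ t)))
      pvB_loop nl nw rest (if overlap > acc.1 && overlap ≥ 2 then (overlap, d) else acc)

def guess_day_for_activity_alt (activity_name : String) (day_map : List (String × Int)) (default_day : Int) : Int :=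
  let nl := PySem.Str.lower activity_name
  pvB_loop nl (PySem.Set.ofList (PySem.Str.split₀ nl)) day_map (0, default_day)

-- ===== PRECONDITION & SPEC =====
def Spec_guess_day_for_activity (activity_name : String) (day_map : List (String × Int)) (default_day : Int) (out : Int) : Prop := out = guess_day_for_activity_alt activity_name day_map default_day
instance (activity_name : String) (day_map : List (String × Int)) (default_day : Int) (out : Int) : Decidable (Spec_guess_day_for_activity activity_name day_map default_day out) := by unfold Spec_guess_day_for_activity; infer_instance

-- ===== CLAIM (what is proved, stated in full; the proofs are below) =====
def Claim_equal_guess_day_for_activity : Prop := ∀ (activity_name : String) (day_map : List (String × Int)) (default_day : Int), Dom_guess_day_for_activity activity_name day_map default_day → Spec_guess_day_for_activity activity_name day_map default_day (guess_day_for_activity activity_name day_map default_day)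

-- ===== LEMMAS AND PROOFS =====
-- core invariant: A's "first substring match, else fold result" equals B's fused loop,
-- for any starting state
theorem pvAB_loop_eq (nl : String) (nw : PySem.Set String) :
    ∀ (l : List (String × Int)) (acc : Int × Int),
      (match pvA_sub nl l with
       | some d => d
       | none => (l.foldl (pvA_step nw) acc).2) = pvB_loop nl nw l acc := by
  intro l
  induction l with
  | nil => intro acc; simp [pvA_sub, pvB_loop]
  | cons p rest ih =>
    intro acc
    obtain ⟨t, d⟩ := p
    simp only [pvA_sub, pvB_loop, List.foldl_cons]
    by_cases h : (PySem.Str.isIn nl t || PySem.Str.isIn t nl) = true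
    · rw [if_pos h, if_pos h]
    · rw [if_neg h, if_neg h]
      exact ih (pvA_step nw acc (t, d))

theorem guess_day_for_activity_spec : Claim_equal_guess_day_for_activity := by
  intro activity_name day_map default_day _
  unfold Spec_guess_day_for_activity guess_day_for_activity guess_day_for_activity_alt
  exact pvAB_loop_eq _ _ day_map (0, default_day)
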